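-- pv_equiv track=rewrite | github.com/parzival1l/masters-thesis-NER | src/IngredientTaggingModel/train.py | combine_word_pieces
-- ===== SOURCE A (Python) =====
-- def combine_word_pieces(tokens, token_predictions):
--
--     special_tokens = ['[CLS]', '[SEP]', '[PAD]']
--     filtered_tokens = [t for t in tokens if t not in special_tokens]
--     filtered_ner_tags = [n for t, n in zip(tokens, token_predictions) if t not in special_tokens]
--
--     combined_tokens = []
--     combined_ner_tags = []
--     current_token = ""
--     current_ner_tag = None
--
--     for token, ner_tag in zip(filtered_tokens, filtered_ner_tags):
--         if not token.startswith("##"):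
--             if current_token:
--                 combined_tokens.append(current_token)
--                 combined_ner_tags.append(current_ner_tag)
--             current_token = token
--             current_ner_tag = ner_tag
--         else:
--             current_token += token[2:]
--     if current_token:
--         combined_tokens.append(current_token)
--         combined_ner_tags.append(current_ner_tag)
--
--     return combined_tokens, combined_ner_tags
-- ===== SOURCE B (Python) =====
-- def combine_word_pieces(tokens, token_predictions):
--     special = {'[CLS]', '[SEP]', '[PAD]'}
--     pairs = [(t, g) for t, g in zip(tokens, token_predictions) if t not in special]
--
--     # continuation pieces at the start have no head word to attach to: skip them
--     i = 0
--     while i < len(pairs) and pairs[i][0].startswith('##'):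
--         i += 1
--
--     words, tags = [], []
--     n = len(pairs)
--     while i < n:
--         head, tag = pairs[i]
--         j = i + 1
--         while j < n and pairs[j][0].startswith('##'):
--             j += 1
--         word = head + ''.join(t[2:] for t, _ in pairs[i + 1:j])
--         if word:  # a group of empty pieces yields no word
--             words.append(word)
--             tags.append(tag)
--         i = j
--     return words, tags
-- ===== Notes on version B (the rewrite author's own statement) =====
-- stated objective: alternative
-- what changed: B replaces A's single streaming accumulator (current_token/current_ner_tag flushed at each new word head) with an index-based two-level scan that delimits each head+continuation run and joins it in one step, keeping the groups that merge to a nonempty word; Pre_ excludes inputs whose special-filtered sequence starts with a continuation piece carrying text after '##', where A returns None - not a str - as that word's NER tag.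
-- outside the precondition, e.g. on combine_word_pieces(['##ab'], ['I']): A returns (['ab'], [None]), B returns ([], [])
import Mathlib
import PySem

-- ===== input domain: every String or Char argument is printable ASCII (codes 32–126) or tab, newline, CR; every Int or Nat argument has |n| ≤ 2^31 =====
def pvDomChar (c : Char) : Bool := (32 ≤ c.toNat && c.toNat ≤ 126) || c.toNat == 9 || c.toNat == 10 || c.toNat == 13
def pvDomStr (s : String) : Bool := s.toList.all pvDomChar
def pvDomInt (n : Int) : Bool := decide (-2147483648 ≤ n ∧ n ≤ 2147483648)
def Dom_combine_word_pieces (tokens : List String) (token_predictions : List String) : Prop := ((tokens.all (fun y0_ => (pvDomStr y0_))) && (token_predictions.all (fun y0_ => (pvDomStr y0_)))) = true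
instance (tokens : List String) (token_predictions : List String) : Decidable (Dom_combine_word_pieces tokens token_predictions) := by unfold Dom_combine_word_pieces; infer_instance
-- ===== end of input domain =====

-- B replaces A's streaming accumulator with an index/run-based scan: delimit each
-- head + '##'-continuation run and join it in one step — objective: alternative decomposition.

-- ===== PORT A =====
def pvSpecialTokens : List String := ["[CLS]", "[SEP]", "[PAD]"]

def pvStepA (st : (List String × List String) × String × Option String) (p : String × String) :
    (List String × List String) × String × Option String :=
  if !(PySem.Str.startswith p.1 "##") then
    if st.2.1 ≠ "" then
      ((st.1.1 ++ [st.2.1], st.1.2 ++ [st.2.2.getD ""]), p.1, some p.2)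
    else (st.1, p.1, some p.2)
  else (st.1, st.2.1 ++ PySem.Str.slice p.1 (some 2) none, st.2.2)

-- current_ner_tag starts as Python None (Option String); inside Pre_ a None tag is never
-- flushed, so the flush writes tag.getD "" (a flushed None would not be a String).
def combine_word_pieces (tokens : List String) (token_predictions : List String) :
    List String × List String :=
  let filtered_tokens := tokens.filter (fun t => !(pvSpecialTokens.contains t))
  let filtered_ner_tags :=
    ((tokens.zip token_predictions).filter (fun p => !(pvSpecialTokens.contains p.1))).map Prod.snd
  let fin := (filtered_tokens.zip filtered_ner_tags).foldl pvStepA (([], []), "", none)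
  if fin.2.1 ≠ "" then (fin.1.1 ++ [fin.2.1], fin.1.2 ++ [fin.2.2.getD ""]) else fin.1

-- ===== PORT B =====
def pvIsPiece (t : String) : Bool := PySem.Str.startswith t "##"

-- the outer/inner while loops of Source B: one segment = head pair + the tokens of its '##' run
def pvGroupHeads : List (String × String) → List (String × String × List String)
  | [] => []
  | (t, n) :: rest =>
    (t, n, (rest.takeWhile fun q => pvIsPiece q.1).map Prod.fst)
      :: pvGroupHeads (rest.dropWhile fun q => pvIsPiece q.1)
termination_by l => l.length
decreasing_by
  simpa using Nat.lt_succ_of_le (List.length_dropWhile_le _ _)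

-- head + ''.join(t[2:] for t, _ in pairs[i+1:j])
def pvMergeWord (head : String) (conts : List String) : String :=
  head ++ PySem.Str.join "" (conts.map fun c => PySem.Str.slice c (some 2) none)

def combine_word_pieces_alt (tokens : List String) (token_predictions : List String) :
    List String × List String :=
  let pairs := (tokens.zip token_predictions).filter (fun p => !(pvSpecialTokens.contains p.1))
  let segs := pvGroupHeads (pairs.dropWhile fun q => pvIsPiece q.1)
  let merged := (segs.map fun s => (pvMergeWord s.1 s.2.2, s.2.1)).filter fun w => w.1 != ""
  (merged.map Prod.fst, merged.map Prod.snd)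

-- ===== PRECONDITION & SPEC =====
-- Pre_ excludes exactly the inputs whose special-filtered sequence starts with a '##'
-- continuation piece carrying text after '##': there Python A returns None — not a str —
-- as the NER tag of the merged word.
def Pre_combine_word_pieces (tokens : List String) (token_predictions : List String) : Prop :=
  ∀ q ∈ ((tokens.zip token_predictions).filter
          (fun p => !(pvSpecialTokens.contains p.1))).takeWhile
        (fun q => PySem.Str.startswith q.1 "##"),
    PySem.Str.slice q.1 (some 2) none = ""
instance (tokens : List String) (token_predictions : List String) : Decidable (Pre_combine_word_pieces tokens token_predictions) := by unfold Pre_combine_word_pieces; infer_instance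

def pvWitness_combine_word_pieces : List String × List String :=
  (["Hel", "##lo", "[SEP]", "wo", "##rld"], ["B", "I", "O", "B", "I"])

def Spec_combine_word_pieces (tokens : List String) (token_predictions : List String) (out : List String × List String) : Prop := out = combine_word_pieces_alt tokens token_predictions
instance (tokens : List String) (token_predictions : List String) (out : List String × List String) : Decidable (Spec_combine_word_pieces tokens token_predictions out) := by unfold Spec_combine_word_pieces; infer_instance

-- ===== CLAIM (what is proved, stated in full; the proofs are below) =====
def Claim_equal_combine_word_pieces : Prop := ∀ (tokens : List String) (token_predictions : List String), Dom_combine_word_pieces tokens token_predictions → Pre_combine_word_pieces tokens token_predictions → Spec_combine_word_pieces tokens token_predictions (combine_word_pieces tokens token_predictions)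

-- ===== LEMMAS AND PROOFS =====

-- A's final flush, as a function of the loop state
def pvAfin (st : (List String × List String) × String × Option String) : List String × List String :=
  if st.2.1 ≠ "" then (st.1.1 ++ [st.2.1], st.1.2 ++ [st.2.2.getD ""]) else st.1

-- proof-side segments carrying an Option tag (A's current_ner_tag)
def pvMergeSeg (s : Option String × String × List String) : String × Option String :=
  (s.2.1 ++ PySem.Str.join "" (s.2.2.map fun c => PySem.Str.slice c (some 2) none), s.1)

def pvGroupHeadsO : List (String × String) → List (Option String × String × List String)
  | [] => []
  | (t, n) :: rest =>
    (some n, t, (rest.takeWhile fun q => pvIsPiece q.1).map Prod.fst)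
      :: pvGroupHeadsO (rest.dropWhile fun q => pvIsPiece q.1)
termination_by l => l.length
decreasing_by
  simpa using Nat.lt_succ_of_le (List.length_dropWhile_le _ _)

-- merge each segment, keep the nonempty words (A drops empty-merged words)
def pvReduce (ss : List (Option String × String × List String)) : List String × List String :=
  (((ss.map pvMergeSeg).filter fun w => w.1 != "").map Prod.fst,
   ((ss.map pvMergeSeg).filter fun w => w.1 != "").map fun w => w.2.getD "")

lemma pvJoin_chars (a : List Char) (l : List (List Char)) :
    PySem.Chars.join [] (a :: l) = a ++ PySem.Chars.join [] l := by
  simp only [PySem.Chars.join, List.intercalate]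
  induction l with
  | nil => simp
  | cons b t ih => simp [List.intersperse] at *

lemma pvJoin_cons (c : String) (cs : List String) :
    PySem.Str.join "" (c :: cs) = c ++ PySem.Str.join "" cs := by
  simp [PySem.Str.join, pvJoin_chars, String.ofList_append, String.ofList_toList]

lemma pvJoin_nil : PySem.Str.join "" ([] : List String) = "" := rfl

lemma pvMergeSeg_cons (o : Option String) (cur t : String) (cs : List String) :
    pvMergeSeg (o, cur ++ PySem.Str.slice t (some 2) none, cs) = pvMergeSeg (o, cur, t :: cs) := by
  simp [pvMergeSeg, pvJoin_cons, String.append_assoc]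

lemma pvReduce_cons (s : Option String × String × List String)
    (ss : List (Option String × String × List String)) :
    pvReduce (s :: ss) =
      if (pvMergeSeg s).1 ≠ "" then
        ((pvMergeSeg s).1 :: (pvReduce ss).1, (pvMergeSeg s).2.getD "" :: (pvReduce ss).2)
      else pvReduce ss := by
  by_cases h : (pvMergeSeg s).1 = "" <;> simp [pvReduce, h]

lemma pvZip_filter (f : String → Bool) : ∀ (ts ps : List String),
    (ts.filter f).zip (((ts.zip ps).filter (fun p => f p.1)).map Prod.snd) =
      (ts.zip ps).filter (fun p => f p.1)
  | [], ps => by simp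
  | t :: ts, [] => by simp
  | t :: ts, p :: ps => by
      by_cases h : f t <;> simp [h, pvZip_filter f ts ps]

lemma pvK : ∀ (l : List (String × String)) (ct cg : List String) (cur tg : String),
    pvAfin (l.foldl pvStepA ((ct, cg), cur, some tg)) =
      (ct ++ (pvReduce ((some tg, cur, (l.takeWhile fun q => pvIsPiece q.1).map Prod.fst)
            :: pvGroupHeadsO (l.dropWhile fun q => pvIsPiece q.1))).1,
       cg ++ (pvReduce ((some tg, cur, (l.takeWhile fun q => pvIsPiece q.1).map Prod.fst)
            :: pvGroupHeadsO (l.dropWhile fun q => pvIsPiece q.1))).2)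
  | [], ct, cg, cur, tg => by
      rw [List.foldl_nil, List.takeWhile_nil, List.dropWhile_nil, pvGroupHeadsO, List.map_nil,
          pvReduce_cons]
      by_cases h : cur = "" <;>
        simp [pvAfin, pvMergeSeg, pvJoin_nil, pvReduce, h]
  | (t, n) :: l, ct, cg, cur, tg => by
      by_cases hp : pvIsPiece t
      · have hs : PySem.Str.startswith t "##" = true := hp
        have hstep : pvStepA ((ct, cg), cur, some tg) (t, n)
            = ((ct, cg), cur ++ PySem.Str.slice t (some 2) none, some tg) := by
          simp only [pvStepA, hs, Bool.not_true]
          simp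
        rw [List.foldl_cons, hstep, pvK l ct cg _ tg,
            List.takeWhile_cons_of_pos (by simpa using hp),
            List.dropWhile_cons_of_pos (by simpa using hp), List.map_cons]
        simp only [pvReduce_cons, pvMergeSeg_cons]
      · have hs : PySem.Str.startswith t "##" = false := by
          simpa [pvIsPiece] using hp
        rw [List.foldl_cons,
            List.takeWhile_cons_of_neg (by simpa using hp),
            List.dropWhile_cons_of_neg (by simpa using hp), List.map_nil]
        by_cases hc : cur = ""
        · have hstep : pvStepA ((ct, cg), cur, some tg) (t, n) = ((ct, cg), t, some n) := by
            simp only [pvStepA, hs, Bool.not_false]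
            simp [hc]
          rw [hstep, pvK l ct cg t n, pvGroupHeadsO, pvReduce_cons ((some tg, cur, []))]
          simp [pvMergeSeg, pvJoin_nil, hc]
        · have hstep : pvStepA ((ct, cg), cur, some tg) (t, n)
              = ((ct ++ [cur], cg ++ [tg]), t, some n) := by
            simp only [pvStepA, hs, Bool.not_false]
            simp [hc]
          rw [hstep, pvK l (ct ++ [cur]) (cg ++ [tg]) t n, pvGroupHeadsO,
              pvReduce_cons ((some tg, cur, []))]
          simp [pvMergeSeg, pvJoin_nil, hc]

lemma pvT : ∀ (l : List (String × String)),
    (∀ q ∈ l.takeWhile (fun q => pvIsPiece q.1), PySem.Str.slice q.1 (some 2) none = "") →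
    pvAfin (l.foldl pvStepA (([], []), "", none)) =
      pvReduce (pvGroupHeadsO (l.dropWhile fun q => pvIsPiece q.1))
  | [], _ => by simp [pvAfin, pvGroupHeadsO, pvReduce]
  | (t, n) :: l, h => by
      by_cases hp : pvIsPiece t
      · have hs : PySem.Str.startswith t "##" = true := hp
        have hmem : (t, n) ∈ ((t, n) :: l).takeWhile (fun q => pvIsPiece q.1) := by
          rw [List.takeWhile_cons_of_pos (by simpa using hp)]
          simp
        have ht : PySem.Str.slice t (some 2) none = "" := h (t, n) hmem
        have hstep : pvStepA (([], []), "", none) (t, n) = (([], []), "", none) := by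
          simp only [pvStepA, hs, Bool.not_true]
          simp [ht]
        have h' : ∀ q ∈ l.takeWhile (fun q => pvIsPiece q.1),
            PySem.Str.slice q.1 (some 2) none = "" := by
          intro q hq
          refine h q ?_
          rw [List.takeWhile_cons_of_pos (by simpa using hp)]
          exact List.mem_cons_of_mem _ hq
        rw [List.foldl_cons, hstep, pvT l h',
            List.dropWhile_cons_of_pos (by simpa using hp)]
      · have hs : PySem.Str.startswith t "##" = false := by
          simpa [pvIsPiece] using hp
        have hstep : pvStepA (([], []), "", none) (t, n) = (([], []), t, some n) := by
          simp only [pvStepA, hs, Bool.not_false]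
          simp
        rw [List.foldl_cons, hstep, pvK l [] [] t n,
            List.dropWhile_cons_of_neg (by simpa using hp)]
        rw [pvGroupHeadsO]
        simp

lemma pvA_eq (ts ps : List String) :
    combine_word_pieces ts ps =
      pvAfin (((ts.zip ps).filter
          (fun p => !(pvSpecialTokens.contains p.1))).foldl pvStepA (([], []), "", none)) := by
  unfold combine_word_pieces
  dsimp only
  rw [pvZip_filter (fun t => !(pvSpecialTokens.contains t)) ts ps]
  rfl

lemma pvGroupHeadsO_eq : ∀ (l : List (String × String)),
    pvGroupHeadsO l = (pvGroupHeads l).map (fun s => (some s.2.1, s.1, s.2.2))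
  | [] => by rw [pvGroupHeadsO, pvGroupHeads]; rfl
  | (t, n) :: l => by
      rw [pvGroupHeadsO, pvGroupHeads, List.map_cons,
          pvGroupHeadsO_eq (l.dropWhile fun q => pvIsPiece q.1)]
termination_by l => l.length
decreasing_by
  simpa using Nat.lt_succ_of_le (List.length_dropWhile_le _ _)

-- pvReduce over Option-tagged segments is B's merge-filter-unzip phase
lemma pvReduce_eq : ∀ (ss : List (String × String × List String)),
    pvReduce (ss.map (fun s => (some s.2.1, s.1, s.2.2))) =
      (((ss.map fun s => (pvMergeWord s.1 s.2.2, s.2.1)).filter fun w => w.1 != "").map Prod.fst,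
       ((ss.map fun s => (pvMergeWord s.1 s.2.2, s.2.1)).filter fun w => w.1 != "").map Prod.snd)
  | [] => rfl
  | s :: ss => by
      rw [List.map_cons, pvReduce_cons, List.map_cons]
      have hm : pvMergeSeg (some s.2.1, s.1, s.2.2) = (pvMergeWord s.1 s.2.2, some s.2.1) := rfl
      by_cases h : pvMergeWord s.1 s.2.2 = ""
      · rw [if_neg (by simp [hm, h]), pvReduce_eq ss]
        simp [h]
      · rw [if_pos (by simp [hm, h]), pvReduce_eq ss]
        simp [hm, h]

-- ===== VERDICT (by name: the statement is the Claim_ definition above) =====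
theorem combine_word_pieces_spec : Claim_equal_combine_word_pieces := by
  intro tokens preds _ hpre
  show combine_word_pieces tokens preds = combine_word_pieces_alt tokens preds
  rw [pvA_eq, pvT _ hpre, pvGroupHeadsO_eq, pvReduce_eq]
  rfl
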